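-- pv_equiv track=rewrite | github.com/taifu/aoc | 2021/18/day_18.py | split
-- ===== SOURCE A (Python) =====
-- def split(snailfish):
--     for pos_digit, c in enumerate(snailfish):
--         if c.isdigit():
--             end_digit = pos_digit
--             while snailfish[end_digit].isdigit():
--                 end_digit += 1
--             value = int(snailfish[pos_digit:end_digit])
--             if value > 9:
--                 return snailfish[:pos_digit] + f"[{value//2},{(value + 1)//2}]" + snailfish[end_digit:], True
--     return snailfish, False
-- ===== SOURCE B (Python) =====
-- def split(snailfish):
--     # one pass: collect all maximal digit runs as (start, end); then pick the
--     # first run whose value exceeds 9 and splice in the split pair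
--     runs = []
--     start = None
--     for i, c in enumerate(snailfish):
--         if c.isdigit():
--             if start is None:
--                 start = i
--         else:
--             if start is not None:
--                 runs.append((start, i))
--                 start = None
--     if start is not None:
--         runs.append((start, len(snailfish)))
--     for start, end in runs:
--         value = int(snailfish[start:end])
--         if value > 9:
--             return snailfish[:start] + f"[{value // 2},{(value + 1) // 2}]" + snailfish[end:], True
--     return snailfish, False
-- ===== Notes on version B (the rewrite author's own statement) =====
-- stated objective: alternative
-- what changed: B tokenizes the string in one enumerate pass into a list of maximal digit runs (start, end) and then, in a separate pass, splices the first run with value > 9, replacing A's per-character rescan whose unguarded inner while re-walks each run once per digit and runs off the end of the string.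
import Mathlib
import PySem

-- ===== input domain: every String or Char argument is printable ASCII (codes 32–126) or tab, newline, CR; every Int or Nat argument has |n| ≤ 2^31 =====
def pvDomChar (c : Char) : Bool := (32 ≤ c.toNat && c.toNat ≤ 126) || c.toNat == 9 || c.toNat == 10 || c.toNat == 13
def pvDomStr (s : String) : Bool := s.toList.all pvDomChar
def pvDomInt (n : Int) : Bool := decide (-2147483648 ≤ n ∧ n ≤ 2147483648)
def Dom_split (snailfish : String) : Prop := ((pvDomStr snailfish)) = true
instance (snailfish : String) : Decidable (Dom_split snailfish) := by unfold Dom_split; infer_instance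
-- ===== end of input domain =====

-- B replaces A's per-character rescan (with its unguarded inner while) by one tokenizing
-- pass that collects all maximal digit runs and a second pass that splices the first run
-- with value > 9 (objective: alternative decomposition; the return value is proved equal).

-- ===== PORT A =====

-- int(s) at both call sites only ever receives a nonempty run of ASCII digits
-- ('0'..'9', produced by isdigit scans); this decimal fold is exact for exactly
-- those strings (PySem.Int.ofChars? agrees there but its internals are private).
def pvValF (a : Int) (c : Char) : Int := a * 10 + ((c.toNat : Int) - 48)

def pvVal (cs : List Char) : Int := cs.foldl pvValF 0

-- f"[{value//2},{(value + 1)//2}]" as characters (both Pythons build this same string)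
def pvRepl (v : Int) : List Char :=
  '[' :: (PySem.Int.toChars (PySem.Int.floordiv v 2)
    ++ ',' :: (PySem.Int.toChars (PySem.Int.floordiv (v + 1) 2) ++ [']']))

-- enumerate(snailfish): the index is always ≥ 0, kept as Nat (both Pythons enumerate)
def pvEnumerate : List Char → Nat → List (Nat × Char)
  | [], _ => []
  | c :: t, k => (k, c) :: pvEnumerate t (k + 1)

-- A's inner while loop advancing end_digit over digits.  Python RAISES IndexError when
-- end_digit runs off the end; there the port stops instead — exactly those inputs are
-- excluded by Pre_split below.
def pvRunEnd (cs : List Char) (j : Nat) : Nat :=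
  if h : j < cs.length then
    (if PySem.Chars.isdigit cs[j] then pvRunEnd cs (j + 1) else j)
  else j
termination_by cs.length - j
decreasing_by omega

-- A's for-loop over enumerate(snailfish); value = int(snailfish[pos_digit:end_digit])
def pvAFor (s : String) (cs : List Char) : List (Nat × Char) → String × Bool
  | [] => (s, false)
  | (i, c) :: rest =>
    if PySem.Chars.isdigit c then
      if 9 < pvVal (PySem.List.slice cs (some (i : Int)) (some ((pvRunEnd cs i : Nat) : Int))) then
        (String.ofList (PySem.List.slice cs none (some (i : Int))
          ++ pvRepl (pvVal (PySem.List.slice cs (some (i : Int)) (some ((pvRunEnd cs i : Nat) : Int))))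
          ++ PySem.List.slice cs (some ((pvRunEnd cs i : Nat) : Int)) none), true)
      else pvAFor s cs rest
    else pvAFor s cs rest

def split (snailfish : String) : String × Bool :=
  pvAFor snailfish snailfish.toList (pvEnumerate snailfish.toList 0)

-- ===== PORT B =====

-- body of B's tokenizing loop: state = (runs so far, start of the open run if any)
def pvTokStep (st : List (Nat × Nat) × Option Nat) (ic : Nat × Char) :
    List (Nat × Nat) × Option Nat :=
  if PySem.Chars.isdigit ic.2 then
    match st.2 with
    | none => (st.1, some ic.1)
    | some s0 => (st.1, some s0)
  else
    match st.2 with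
    | none => st
    | some s0 => (st.1 ++ [(s0, ic.1)], none)

-- all maximal digit runs of cs as (start, end) pairs, plus the trailing-run flush
def pvTokens (cs : List Char) : List (Nat × Nat) :=
  match (pvEnumerate cs 0).foldl pvTokStep ([], none) with
  | (runs, none) => runs
  | (runs, some s0) => runs ++ [(s0, cs.length)]

-- B's selection loop over the runs; value = int(snailfish[start:end])
def pvSelect (s : String) (cs : List Char) : List (Nat × Nat) → String × Bool
  | [] => (s, false)
  | (a, b) :: rest =>
    if 9 < pvVal ((cs.drop a).take (b - a)) then
      (String.ofList (cs.take a ++ pvRepl (pvVal ((cs.drop a).take (b - a))) ++ cs.drop b), true)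
    else pvSelect s cs rest

def split_alt (snailfish : String) : String × Bool :=
  pvSelect snailfish snailfish.toList (pvTokens snailfish.toList)

-- ===== PRECONDITION & SPEC =====

-- state machine over the characters: has a completed digit run of value > 9 been seen,
-- and the value of the currently open digit run (if any)
def pvPreStep (st : Bool × Option Int) (c : Char) : Bool × Option Int :=
  if PySem.Chars.isdigit c then (st.1, some ((st.2.getD 0) * 10 + ((c.toNat : Int) - 48)))
  else (st.1 || st.2.any (fun v => decide (9 < v)), none)

-- Pre_ excludes exactly the inputs where A raises IndexError: strings that end inside a
-- digit run which A's scan reaches (i.e. no earlier completed digit run has value > 9) —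
-- A's unguarded inner while loop then indexes past the end of the string.
def Pre_split (snailfish : String) : Prop :=
  (snailfish.toList.foldl pvPreStep (false, none)).1 = true ∨
    (snailfish.toList.foldl pvPreStep (false, none)).2 = none

instance (snailfish : String) : Decidable (Pre_split snailfish) := by
  unfold Pre_split; infer_instance

def pvWitness_split : String := "[15]"

def Spec_split (snailfish : String) (out : String × Bool) : Prop := out = split_alt snailfish

instance (snailfish : String) (out : String × Bool) : Decidable (Spec_split snailfish out) := by
  unfold Spec_split; infer_instance

-- ===== CLAIM (what is proved, stated in full; the proofs are below) =====
def Claim_equal_split : Prop :=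
  ∀ (snailfish : String), Dom_split snailfish → Pre_split snailfish →
    Spec_split snailfish (split snailfish)

-- ===== LEMMAS AND PROOFS =====

-- the maximal digit runs as (start, end) pairs, by chunks (proof-side reference shape)
def pvChunks : List Char → Nat → List (Nat × Nat)
  | [], _ => []
  | c :: t, k =>
    if h : PySem.Chars.isdigit c = true then
      (k, k + ((c :: t).takeWhile PySem.Chars.isdigit).length)
        :: pvChunks ((c :: t).dropWhile PySem.Chars.isdigit)
            (k + ((c :: t).takeWhile PySem.Chars.isdigit).length)
    else pvChunks t (k + 1)
termination_by u _ => u.length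
decreasing_by
  · simp only [List.dropWhile_cons, h, if_true, List.length_cons]
    exact Nat.lt_succ_of_le (List.length_dropWhile_le _ t)
  · simp

lemma pvDigit_ge (c : Char) (h : PySem.Chars.isdigit c = true) : 48 ≤ c.toNat := by
  simp [PySem.Chars.isdigit] at h
  exact_mod_cast h.1

lemma pvValFoldMono (t : List Char) : ∀ (a b : Int), a ≤ b →
    t.foldl pvValF a ≤ t.foldl pvValF b := by
  induction t with
  | nil => intro a b h; simpa using h
  | cons c t ih =>
    intro a b h
    simp only [List.foldl_cons]
    exact ih _ _ (by simp only [pvValF]; omega)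

lemma pvVal_cons_le (c : Char) (t : List Char) (h : 48 ≤ c.toNat) :
    pvVal t ≤ pvVal (c :: t) := by
  unfold pvVal
  simp only [List.foldl_cons]
  have h48 : (48 : Int) ≤ (c.toNat : Int) := by exact_mod_cast h
  exact pvValFoldMono t 0 (pvValF 0 c) (by simp only [pvValF]; omega)

lemma pvRunEnd_eq (cs : List Char) : ∀ (n k : Nat), cs.length - k = n →
    pvRunEnd cs k = k + ((cs.drop k).takeWhile PySem.Chars.isdigit).length := by
  intro n
  induction n using Nat.strong_induction_on with
  | _ n ih =>
    intro k hn
    rw [pvRunEnd]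
    by_cases hk : k < cs.length
    · rw [List.drop_eq_getElem_cons hk, List.takeWhile_cons]
      by_cases hd : PySem.Chars.isdigit cs[k] = true
      · rw [dif_pos hk, if_pos hd, if_pos hd, List.length_cons,
          ih (cs.length - (k + 1)) (by omega) (k + 1) rfl]
        omega
      · rw [dif_pos hk, if_neg hd, if_neg hd]
        simp
    · have hnil : cs.drop k = [] := List.drop_eq_nil_of_le (by omega)
      rw [dif_neg hk, hnil]
      simp

lemma pvTW (r rest : List Char) (h1 : ∀ x ∈ r, PySem.Chars.isdigit x = true)
    (h2 : ∀ d ∈ rest.head?, PySem.Chars.isdigit d = false) :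
    (r ++ rest).takeWhile PySem.Chars.isdigit = r ∧
    (r ++ rest).dropWhile PySem.Chars.isdigit = rest := by
  induction r with
  | nil =>
    cases rest with
    | nil => simp
    | cons d t' =>
      have hd := h2 d (by simp)
      simp [hd]
  | cons c r' ihr =>
    have hc := h1 c (by simp)
    have h := ihr (fun x hx => h1 x (by simp [hx]))
    simp [hc, h.1, h.2]

lemma pvEnum_append (r : List Char) : ∀ (rest : List Char) (k : Nat),
    pvEnumerate (r ++ rest) k = pvEnumerate r k ++ pvEnumerate rest (k + r.length) := by
  induction r with
  | nil => intro rest k; simp [pvEnumerate]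
  | cons c r' ih =>
    intro rest k
    rw [List.cons_append]
    show (k, c) :: pvEnumerate (r' ++ rest) (k + 1) = _
    rw [ih rest (k + 1)]
    simp only [pvEnumerate, List.length_cons, List.cons_append]
    rw [show k + (r'.length + 1) = k + 1 + r'.length from by omega]

lemma pvDW_head (p : Char → Bool) : ∀ (l : List Char) (d : Char) (t' : List Char),
    l.dropWhile p = d :: t' → p d = false := by
  intro l
  induction l with
  | nil => intro d t' h; simp [List.dropWhile] at h
  | cons c t ih =>
    intro d t' h
    by_cases hc : p c = true
    · rw [List.dropWhile_cons, if_pos hc] at h; exact ih d t' h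
    · rw [List.dropWhile_cons, if_neg hc] at h
      cases h
      simpa using hc

lemma pvRestHead (t : List Char) :
    ∀ d ∈ ((t.dropWhile PySem.Chars.isdigit).head? : Option Char),
      PySem.Chars.isdigit d = false := by
  intro d hd
  cases hres : t.dropWhile PySem.Chars.isdigit with
  | nil => rw [hres] at hd; simp at hd
  | cons d0 t' =>
    rw [hres] at hd
    simp at hd
    cases hd
    exact pvDW_head _ t _ t' hres

lemma pvTW_all (p : Char → Bool) (l : List Char) :
    ∀ x ∈ l.takeWhile p, p x = true := by
  intro x hx
  exact List.mem_takeWhile_imp hx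

lemma pvAllRun (c : Char) (t : List Char) (hd : PySem.Chars.isdigit c = true) :
    ∀ x ∈ c :: t.takeWhile PySem.Chars.isdigit, PySem.Chars.isdigit x = true := by
  intro x hx
  rcases List.mem_cons.mp hx with hx | hx
  · subst hx; exact hd
  · exact pvTW_all _ t x hx

lemma pvDecomp (c : Char) (t : List Char) (hd : PySem.Chars.isdigit c = true) :
    c :: t = (c :: t.takeWhile PySem.Chars.isdigit) ++ t.dropWhile PySem.Chars.isdigit := by
  conv_lhs => rw [← List.takeWhile_append_dropWhile (p := PySem.Chars.isdigit) (l := c :: t)]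
  simp [hd]

lemma pvDropSucc (cs : List Char) (k : Nat) (c : Char) (t : List Char)
    (hdrop : cs.drop k = c :: t) : cs.drop (k + 1) = t := by
  have h := List.tail_drop (l := cs) (i := k)
  rw [hdrop] at h
  simpa using h.symm

lemma pvDropRun (cs : List Char) (k : Nat) (c : Char) (t : List Char)
    (hdrop : cs.drop k = c :: t) (hd : PySem.Chars.isdigit c = true) :
    cs.drop (k + ((t.takeWhile PySem.Chars.isdigit).length + 1))
      = t.dropWhile PySem.Chars.isdigit := by
  rw [← List.drop_drop, hdrop]
  conv_lhs => rw [pvDecomp c t hd]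
  rw [show (t.takeWhile PySem.Chars.isdigit).length + 1
      = (c :: t.takeWhile PySem.Chars.isdigit).length from by simp]
  exact List.drop_left

lemma pvTakeRun (cs : List Char) (k : Nat) (c : Char) (t : List Char)
    (hdrop : cs.drop k = c :: t) (hd : PySem.Chars.isdigit c = true) :
    (cs.drop k).take ((t.takeWhile PySem.Chars.isdigit).length + 1)
      = c :: t.takeWhile PySem.Chars.isdigit := by
  rw [hdrop]
  conv_lhs => rw [pvDecomp c t hd]
  rw [show (t.takeWhile PySem.Chars.isdigit).length + 1
      = (c :: t.takeWhile PySem.Chars.isdigit).length from by simp]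
  exact List.take_left

lemma pvSliceRun (cs : List Char) (k : Nat) (c : Char) (t : List Char)
    (hdrop : cs.drop k = c :: t) (hd : PySem.Chars.isdigit c = true) :
    PySem.List.slice cs (some (k : Int))
        (some ((k + ((t.takeWhile PySem.Chars.isdigit).length + 1) : Nat) : Int))
      = c :: t.takeWhile PySem.Chars.isdigit := by
  rw [PySem.List.slice_natCast]
  rw [show k + ((t.takeWhile PySem.Chars.isdigit).length + 1) - k
      = (t.takeWhile PySem.Chars.isdigit).length + 1 from by omega]
  exact pvTakeRun cs k c t hdrop hd

lemma pvRunEnd_run (cs : List Char) (k : Nat) (c : Char) (t : List Char)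
    (hdrop : cs.drop k = c :: t) (hd : PySem.Chars.isdigit c = true) :
    pvRunEnd cs k = k + ((t.takeWhile PySem.Chars.isdigit).length + 1) := by
  rw [pvRunEnd_eq cs (cs.length - k) k rfl, hdrop, List.takeWhile_cons, if_pos hd]
  simp

lemma pvChunks_digit (c : Char) (t : List Char) (k : Nat)
    (hd : PySem.Chars.isdigit c = true) :
    pvChunks (c :: t) k
      = (k, k + ((t.takeWhile PySem.Chars.isdigit).length + 1))
        :: pvChunks (t.dropWhile PySem.Chars.isdigit)
            (k + ((t.takeWhile PySem.Chars.isdigit).length + 1)) := by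
  rw [pvChunks]
  simp [hd]

lemma pvChunks_nondigit (c : Char) (t : List Char) (k : Nat)
    (hd : ¬ PySem.Chars.isdigit c = true) :
    pvChunks (c :: t) k = pvChunks t (k + 1) := by
  rw [pvChunks]
  simp [hd]

lemma pvTrailLen (cs : List Char) (k : Nat) (c : Char) (t : List Char)
    (hdrop : cs.drop k = c :: t) (hd : PySem.Chars.isdigit c = true)
    (hnil : t.dropWhile PySem.Chars.isdigit = []) :
    cs.length = k + ((t.takeWhile PySem.Chars.isdigit).length + 1) := by
  have h1 : cs.drop k = c :: t.takeWhile PySem.Chars.isdigit := by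
    rw [hdrop]
    conv_lhs => rw [pvDecomp c t hd]
    rw [hnil]
    simp
  have h3 : k < cs.length := by
    by_contra hk
    rw [List.drop_eq_nil_of_le (by omega)] at h1
    simp at h1
  have h2 := congrArg List.length h1
  rw [List.length_drop] at h2
  simp at h2
  omega

lemma pvEnumRun (c : Char) (t : List Char) (k : Nat)
    (hd : PySem.Chars.isdigit c = true) :
    pvEnumerate (c :: t) k
      = (k, c) :: (pvEnumerate (t.takeWhile PySem.Chars.isdigit) (k + 1)
          ++ pvEnumerate (t.dropWhile PySem.Chars.isdigit)
              (k + ((t.takeWhile PySem.Chars.isdigit).length + 1))) := by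
  conv_lhs => rw [pvDecomp c t hd, List.cons_append]
  show (k, c) :: pvEnumerate (t.takeWhile PySem.Chars.isdigit
      ++ t.dropWhile PySem.Chars.isdigit) (k + 1) = _
  rw [pvEnum_append]
  congr 3
  omega

lemma pvSkip (s : String) (cs : List Char) :
    ∀ (r rest : List Char) (k : Nat),
      cs.drop k = r ++ rest →
      (∀ x ∈ r, PySem.Chars.isdigit x = true) →
      (∀ d ∈ (rest.head? : Option Char), PySem.Chars.isdigit d = false) →
      pvVal r ≤ 9 →
      pvAFor s cs (pvEnumerate (r ++ rest) k) = pvAFor s cs (pvEnumerate rest (k + r.length)) := by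
  intro r
  induction r with
  | nil => intro rest k _ _ _ _; simp
  | cons c r' ih =>
    intro rest k hdrop h1 h2 hv
    have hc : PySem.Chars.isdigit c = true := h1 c (by simp)
    have htw := pvTW (c :: r') rest h1 h2
    have hre : pvRunEnd cs k = k + (r'.length + 1) := by
      rw [pvRunEnd_eq cs (cs.length - k) k rfl, hdrop, htw.1]
      simp
    have hsl : PySem.List.slice cs (some (k : Int)) (some ((k + (r'.length + 1) : Nat) : Int))
        = c :: r' := by
      rw [PySem.List.slice_natCast, hdrop,
        show k + (r'.length + 1) - k = (c :: r').length from by simp]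
      exact List.take_left
    rw [List.cons_append]
    show pvAFor s cs ((k, c) :: pvEnumerate (r' ++ rest) (k + 1)) = _
    simp only [pvAFor, hc, if_true]
    rw [hre, hsl, if_neg (by omega : ¬ 9 < pvVal (c :: r'))]
    have hdrop' : cs.drop (k + 1) = r' ++ rest := pvDropSucc cs k c _ hdrop
    rw [ih rest (k + 1) hdrop' (fun x hx => h1 x (by simp [hx])) h2
      (le_trans (pvVal_cons_le c r' (pvDigit_ge c hc)) hv)]
    congr 2
    simp
    omega

lemma pvTokRunFold : ∀ (l : List (Nat × Char)) (acc : List (Nat × Nat)) (s0 : Nat),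
    (∀ p ∈ l, PySem.Chars.isdigit p.2 = true) →
    l.foldl pvTokStep (acc, some s0) = (acc, some s0) := by
  intro l
  induction l with
  | nil => intro acc s0 _; rfl
  | cons p t ih =>
    intro acc s0 h
    have hp := h p (by simp)
    simp only [List.foldl_cons, pvTokStep, hp, if_true]
    exact ih acc s0 (fun q hq => h q (by simp [hq]))

lemma pvEnum_all_digit (r : List Char) (h : ∀ x ∈ r, PySem.Chars.isdigit x = true) :
    ∀ (k : Nat) (p : Nat × Char), p ∈ pvEnumerate r k → PySem.Chars.isdigit p.2 = true := by
  induction r with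
  | nil => intro k p hp; simp [pvEnumerate] at hp
  | cons c r' ih =>
    intro k p hp
    simp only [pvEnumerate, List.mem_cons] at hp
    rcases hp with hp | hp
    · subst hp; exact h c (by simp)
    · exact ih (fun x hx => h x (by simp [hx])) (k + 1) p hp

lemma pvTokAux (cs : List Char) : ∀ (n : Nat) (u : List Char) (k : Nat)
    (acc : List (Nat × Nat)), u.length = n → cs.drop k = u →
    (match (pvEnumerate u k).foldl pvTokStep (acc, none) with
      | (runs, none) => runs
      | (runs, some s0) => runs ++ [(s0, cs.length)]) = acc ++ pvChunks u k := by
  intro n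
  induction n using Nat.strong_induction_on with
  | _ n ih =>
    intro u k acc hlen hdrop
    match u with
    | [] => simp [pvEnumerate, pvChunks]
    | c :: t =>
      by_cases hd : PySem.Chars.isdigit c = true
      · -- a digit run starts here
        have step1 : pvTokStep (acc, none) (k, c) = (acc, some k) := by
          simp [pvTokStep, hd]
        have hrunfold : (pvEnumerate (t.takeWhile PySem.Chars.isdigit) (k + 1)).foldl
            pvTokStep (acc, some k) = (acc, some k) :=
          pvTokRunFold _ acc k (pvEnum_all_digit _ (pvTW_all _ t) (k + 1))
        rw [pvEnumRun c t k hd, List.foldl_cons, step1, List.foldl_append, hrunfold,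
          pvChunks_digit c t k hd]
        cases hres : t.dropWhile PySem.Chars.isdigit with
        | nil =>
          rw [pvTrailLen cs k c t hdrop hd hres]
          simp [pvEnumerate, pvChunks]
        | cons d t' =>
          have hdd : PySem.Chars.isdigit d = false := pvDW_head _ t d t' hres
          have step2 : pvTokStep (acc, some k)
              (k + ((t.takeWhile PySem.Chars.isdigit).length + 1), d)
              = (acc ++ [(k, k + ((t.takeWhile PySem.Chars.isdigit).length + 1))], none) := by
            simp [pvTokStep, hdd]
          have hdropd : cs.drop (k + ((t.takeWhile PySem.Chars.isdigit).length + 1)) = d :: t' := by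
            rw [pvDropRun cs k c t hdrop hd, hres]
          have hdropt' : cs.drop (k + ((t.takeWhile PySem.Chars.isdigit).length + 1) + 1) = t' :=
            pvDropSucc cs _ d t' hdropd
          have hlt : t'.length < n := by
            have h1 := List.length_dropWhile_le PySem.Chars.isdigit t
            rw [hres] at h1
            simp at h1
            simp at hlen
            omega
          simp only [pvEnumerate, List.foldl_cons, step2]
          rw [ih t'.length hlt t' _ _ rfl hdropt']
          rw [pvChunks_nondigit d t' _ (by simp [hdd])]
          simp
      · -- not a digit: skip
        have hstep : pvTokStep (acc, none) (k, c) = (acc, none) := by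
          simp [pvTokStep, hd]
        rw [pvChunks_nondigit c t k hd]
        simp only [pvEnumerate, List.foldl_cons, hstep]
        exact ih t.length (by simp at hlen; omega) t (k + 1) acc rfl
          (pvDropSucc cs k c t hdrop)

lemma pvTokens_eq_chunks (cs : List Char) : pvTokens cs = pvChunks cs 0 := by
  unfold pvTokens
  have h := pvTokAux cs cs.length cs 0 [] rfl (by simp)
  simpa using h

lemma pvMain (s : String) (cs : List Char) : ∀ (n : Nat) (u : List Char) (k : Nat),
    u.length = n → cs.drop k = u →
    pvAFor s cs (pvEnumerate u k) = pvSelect s cs (pvChunks u k) := by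
  intro n
  induction n using Nat.strong_induction_on with
  | _ n ih =>
    intro u k hlen hdrop
    match u with
    | [] => simp [pvEnumerate, pvChunks, pvAFor, pvSelect]
    | c :: t =>
      by_cases hd : PySem.Chars.isdigit c = true
      · rw [pvChunks_digit c t k hd]
        have hsel : (cs.drop k).take (k + ((t.takeWhile PySem.Chars.isdigit).length + 1) - k)
            = c :: t.takeWhile PySem.Chars.isdigit := by
          rw [show k + ((t.takeWhile PySem.Chars.isdigit).length + 1) - k
              = (t.takeWhile PySem.Chars.isdigit).length + 1 from by omega]
          exact pvTakeRun cs k c t hdrop hd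
        by_cases hv : 9 < pvVal (c :: t.takeWhile PySem.Chars.isdigit)
        · -- the run splits: both produce the same spliced string
          show pvAFor s cs ((k, c) :: pvEnumerate t (k + 1)) = _
          simp only [pvAFor, pvSelect, hd, if_true, hsel,
            pvRunEnd_run cs k c t hdrop hd, pvSliceRun cs k c t hdrop hd]
          rw [if_pos hv, if_pos hv, PySem.List.slice_to_natCast, PySem.List.slice_from_natCast]
        · -- the run is small: A walks through it, B skips the token
          have hskip := pvSkip s cs (c :: t.takeWhile PySem.Chars.isdigit)
            (t.dropWhile PySem.Chars.isdigit) k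
            (by rw [hdrop]; exact pvDecomp c t hd) (pvAllRun c t hd) (pvRestHead t)
            (by omega)
          have hA : pvAFor s cs (pvEnumerate (c :: t) k)
              = pvAFor s cs (pvEnumerate (t.dropWhile PySem.Chars.isdigit)
                  (k + ((t.takeWhile PySem.Chars.isdigit).length + 1))) := by
            conv_lhs => rw [pvDecomp c t hd]
            rw [hskip]
            congr 2
          have hlt : (t.dropWhile PySem.Chars.isdigit).length < n := by
            have h1 := List.length_dropWhile_le PySem.Chars.isdigit t
            simp at hlen
            omega
          rw [hA, ih _ hlt _ _ rfl (pvDropRun cs k c t hdrop hd)]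
          simp only [pvSelect, hsel]
          rw [if_neg hv]
      · rw [pvChunks_nondigit c t k hd]
        show pvAFor s cs ((k, c) :: pvEnumerate t (k + 1)) = _
        simp only [pvAFor]
        rw [if_neg hd]
        exact ih t.length (by simp at hlen; omega) t (k + 1) rfl (pvDropSucc cs k c t hdrop)

-- ===== VERDICT (by name: the statement is the Claim_ definition above) =====
theorem split_spec : Claim_equal_split := by
  intro s _ _
  unfold Spec_split split split_alt
  rw [pvTokens_eq_chunks]
  exact pvMain s s.toList s.toList.length s.toList 0 rfl (by simp)
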